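-- pv_equiv track=rewrite | github.com/protocol7/advent-of-code | 2016/22/foo.py | viable
-- ===== SOURCE A (Python) =====
-- def viable(disks):
--     v = 0
--     for a in disks:
--         for b in disks:
--             if a == b:
--                 continue
--             if a[1] == 0:
--                 continue
--             if a[1] <= b[2]:
--                 v += 1
--     return v
-- ===== SOURCE B (Python) =====
-- def viable(disks):
--     avails = sorted(d[2] for d in disks)
--     cnt = {}
--     for d in disks:
--         cnt[d] = cnt.get(d, 0) + 1
--     n = len(avails)
--     v = 0
--     for a in disks:
--         u = a[1]
--         if u == 0:
--             continue
--         lo, hi = 0, n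
--         while lo < hi:
--             mid = (lo + hi) // 2
--             if avails[mid] < u:
--                 lo = mid + 1
--             else:
--                 hi = mid
--         c = n - lo
--         if u <= a[2]:
--             c -= cnt[a]
--         v += c
--     return v
-- ===== Notes on version B (the rewrite author's own statement) =====
-- stated objective: faster
-- what changed: Replaced A's quadratic all-pairs double loop by sorting the avail values once, counting per disk the avails >= used via binary search, and subtracting the value-equal disks (counted once in a dict) that A's a == b test skips.
import Mathlib
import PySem

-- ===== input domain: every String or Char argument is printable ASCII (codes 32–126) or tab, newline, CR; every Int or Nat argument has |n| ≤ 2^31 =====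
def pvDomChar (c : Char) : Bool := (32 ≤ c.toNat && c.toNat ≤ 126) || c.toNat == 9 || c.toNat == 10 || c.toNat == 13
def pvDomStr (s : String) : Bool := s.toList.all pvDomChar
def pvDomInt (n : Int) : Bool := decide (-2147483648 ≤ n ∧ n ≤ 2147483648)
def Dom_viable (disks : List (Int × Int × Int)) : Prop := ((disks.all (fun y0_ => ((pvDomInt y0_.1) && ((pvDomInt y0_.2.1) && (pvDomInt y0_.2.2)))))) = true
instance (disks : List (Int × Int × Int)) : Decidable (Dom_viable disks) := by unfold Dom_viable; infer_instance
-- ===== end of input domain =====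

-- B replaces A's quadratic all-pairs scan by sorting the avail values once and
-- binary-searching, per disk, how many avails fit its used (objective: faster, O(n log n) vs O(n^2)).
-- ===== PORT A =====
def viable (disks : List (Int × Int × Int)) : Int :=
  disks.foldl (fun v a =>
    disks.foldl (fun v b =>
      if a = b then v
      else if a.2.1 = 0 then v
      else if a.2.1 ≤ b.2.2 then v + 1
      else v) v) 0

-- ===== PORT B =====
-- hand-written bisect_left while-loop from Source B; avails[mid] is always in range
-- (lo ≤ mid < hi ≤ avails.length), so `getD _ 0` is exact here.
def viableBsearch (avails : List Int) (u : Int) : Nat → Nat → Nat → Nat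
  | 0, lo, _ => lo
  | fuel + 1, lo, hi =>
    if lo < hi then
      if avails.getD ((lo + hi) / 2) 0 < u then viableBsearch avails u fuel ((lo + hi) / 2 + 1) hi
      else viableBsearch avails u fuel lo ((lo + hi) / 2)
    else lo

-- sort the avail values once; for each disk with used != 0, binary-search how many
-- avails are >= used and subtract the value-equal disks (which A's `a == b` skips).
def viable_alt (disks : List (Int × Int × Int)) : Int :=
  let avails := PySem.List.sorted (disks.map (fun d => d.2.2)) (fun x => x)
  -- cnt[d] = cnt.get(d, 0) + 1 ; the cnt[a] lookup below is exact as getD since a is a key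
  let cnt : PySem.Dict (Int × Int × Int) Int :=
    disks.foldl (fun c d => c.insert d (c.getD d 0 + 1)) PySem.Dict.empty
  let n := avails.length
  disks.foldl (fun v a =>
    if a.2.1 = 0 then v
    else
      let lo := viableBsearch avails a.2.1 n 0 n
      let c : Int := (n : Int) - (lo : Int)
      let c := if a.2.1 ≤ a.2.2 then c - cnt.getD a 0 else c
      v + c) 0

-- ===== PRECONDITION & SPEC =====
def Spec_viable (disks : List (Int × Int × Int)) (out : Int) : Prop := out = viable_alt disks
instance (disks : List (Int × Int × Int)) (out : Int) : Decidable (Spec_viable disks out) := by unfold Spec_viable; infer_instance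

-- ===== CLAIM (what is proved, stated in full; the proofs are below) =====
def Claim_equal_viable : Prop := ∀ (disks : List (Int × Int × Int)), Dom_viable disks → Spec_viable disks (viable disks)

-- ===== LEMMAS AND PROOFS =====

lemma viableBsearch_inv (avails : List Int) (u : Int)
    (hs : List.Pairwise (· ≤ ·) avails) :
    ∀ fuel lo hi, hi - lo ≤ fuel → lo ≤ hi → hi ≤ avails.length →
    (∀ i (h : i < avails.length), i < lo → avails[i] < u) →
    (∀ i (h : i < avails.length), hi ≤ i → u ≤ avails[i]) →
    lo ≤ viableBsearch avails u fuel lo hi ∧ viableBsearch avails u fuel lo hi ≤ hi ∧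
    (∀ i (h : i < avails.length), i < viableBsearch avails u fuel lo hi → avails[i] < u) ∧
    (∀ i (h : i < avails.length), viableBsearch avails u fuel lo hi ≤ i → u ≤ avails[i]) := by
  have hpw := List.pairwise_iff_getElem.mp hs
  intro fuel
  induction fuel with
  | zero =>
    intro lo hi hf hlh hhl hlo hhi
    have he : lo = hi := by omega
    simp only [viableBsearch]
    exact ⟨le_refl _, hlh, fun i h hi' => hlo i h hi', fun i h hi' => hhi i h (by omega)⟩
  | succ f ih =>
    intro lo hi hf hlh hhl hlo hhi
    simp only [viableBsearch]
    by_cases h : lo < hi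
    · simp only [h, if_true]
      have hmlen : (lo + hi) / 2 < avails.length := by omega
      have hget : avails.getD ((lo + hi) / 2) 0 = avails[(lo + hi) / 2] :=
        List.getD_eq_getElem avails 0 hmlen
      by_cases hc : avails.getD ((lo + hi) / 2) 0 < u
      · simp only [hc, if_true]
        have h1 := ih ((lo + hi) / 2 + 1) hi (by omega) (by omega) hhl
          (fun i hil hi' => by
            rcases Nat.lt_or_ge i ((lo + hi) / 2) with hlt | hge
            · exact lt_of_le_of_lt (hpw i ((lo+hi)/2) hil hmlen hlt) (hget ▸ hc)
            · have : i = (lo + hi) / 2 := by omega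
              subst this; exact hget ▸ hc)
          hhi
        exact ⟨by omega, h1.2.1, h1.2.2.1, h1.2.2.2⟩
      · simp only [hc, if_false]
        rw [not_lt] at hc
        have h1 := ih lo ((lo + hi) / 2) (by omega) (by omega) (by omega) hlo
          (fun i hil hi' => by
            rcases Nat.lt_or_ge ((lo + hi) / 2) i with hlt | hge
            · exact le_trans (hget ▸ hc) (hpw ((lo+hi)/2) i hmlen hil hlt)
            · have : i = (lo + hi) / 2 := by omega
              subst this; exact hget ▸ hc)
        exact ⟨h1.1, by omega, h1.2.2.1, h1.2.2.2⟩
    · simp only [h, if_false]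
      exact ⟨le_refl _, hlh, fun i hh hi' => hlo i hh hi', fun i hh hi' => hhi i hh (by omega)⟩

lemma viableBsearch_countP (avails : List Int) (u : Int)
    (hs : List.Pairwise (· ≤ ·) avails) :
    avails.countP (fun x => decide (u ≤ x)) + viableBsearch avails u avails.length 0 avails.length
      = avails.length := by
  obtain ⟨h0, hle, hlt, hge⟩ := viableBsearch_inv avails u hs avails.length 0 avails.length
    (by omega) (by omega) (le_refl _)
    (fun i h hi' => absurd hi' (by omega)) (fun i h hi' => absurd hi' (by omega))
  set r := viableBsearch avails u avails.length 0 avails.length with hr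
  have h1 : (avails.take r).countP (fun x => decide (u ≤ x)) = 0 := by
    rw [List.countP_eq_zero]
    intro x hx
    obtain ⟨i, hi, hix⟩ := List.mem_take_iff_getElem.mp hx
    subst hix
    simp only [decide_eq_true_eq, not_le]
    exact hlt i (by omega) (by omega)
  have h2 : (avails.drop r).countP (fun x => decide (u ≤ x)) = (avails.drop r).length := by
    rw [List.countP_eq_length]
    intro x hx
    obtain ⟨i, hi, hix⟩ := List.mem_iff_getElem.mp hx
    subst hix
    rw [List.getElem_drop]
    simp only [decide_eq_true_eq]
    exact hge (r + i) (by simp at hi; omega) (by omega)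
  conv_lhs => rw [← List.take_append_drop r avails]
  rw [List.countP_append, h1, h2]
  simp
  omega

lemma countP_split (disks : List (Int × Int × Int)) (a : Int × Int × Int) (u : Int) :
    disks.countP (fun b => decide (¬a = b ∧ u ≤ b.2.2))
      + disks.countP (fun b => decide (a = b ∧ u ≤ b.2.2))
      = disks.countP (fun b => decide (u ≤ b.2.2)) := by
  induction disks with
  | nil => simp
  | cons h t ih =>
    simp only [List.countP_cons]
    have A1 : ((if decide (¬a = h ∧ u ≤ h.2.2) = true then 1 else 0) : Nat)
        + (if decide (a = h ∧ u ≤ h.2.2) = true then 1 else 0)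
        = (if decide (u ≤ h.2.2) = true then 1 else 0) := by
      by_cases h1 : a = h <;> by_cases h2 : u ≤ h.2.2 <;> simp [h1, h2]
    omega

lemma countP_eq_self (disks : List (Int × Int × Int)) (a : Int × Int × Int) (u : Int) :
    disks.countP (fun b => decide (a = b ∧ u ≤ b.2.2))
      = if u ≤ a.2.2 then disks.count a else 0 := by
  by_cases hu : u ≤ a.2.2
  · simp only [hu, if_true, List.count]
    apply List.countP_congr
    intro b _
    by_cases hb : a = b
    · subst hb; simp [hu]
    · simp [hb, Ne.symm hb]
  · simp only [hu, if_false]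
    rw [List.countP_eq_zero]
    intro b _
    simp only [decide_eq_true_eq, not_and]
    intro hb; subst hb; exact hu

-- ===== VERDICT (by name: the statement is the Claim_ definition above) =====
theorem viable_spec : Claim_equal_viable := by
  intro disks _
  unfold Spec_viable
  show viable disks = viable_alt disks
  have hpw : List.Pairwise (· ≤ ·) (PySem.List.sorted (disks.map (fun d => d.2.2)) (fun x => x)) :=
    PySem.List.sorted_pairwise (disks.map (fun d => d.2.2)) (fun x => x)
  have hperm : (PySem.List.sorted (disks.map (fun d => d.2.2)) (fun x => x)).Perm (disks.map (fun d => d.2.2)) :=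
    PySem.List.sorted_perm (disks.map (fun d => d.2.2)) (fun x => x) false
  set avails := PySem.List.sorted (disks.map (fun d => d.2.2)) (fun x => x) with ha
  have hcnt : ∀ a : Int × Int × Int,
      (disks.foldl (fun c d => c.insert d (c.getD d 0 + 1)) (PySem.Dict.empty : PySem.Dict (Int × Int × Int) Int)).getD a 0
        = (disks.count a : Int) := by
    intro a
    exact PySem.Dict.getD_counter disks a
  rw [show viable disks = disks.foldl (fun v a =>
      disks.foldl (fun v b =>
        if a = b then v
        else if a.2.1 = 0 then v
        else if a.2.1 ≤ b.2.2 then v + 1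
        else v) v) 0 from rfl]
  rw [show viable_alt disks = disks.foldl (fun v a =>
      if a.2.1 = 0 then v
      else v + (if a.2.1 ≤ a.2.2 then
          ((avails.length : Int) - (viableBsearch avails a.2.1 avails.length 0 avails.length : Int))
            - (disks.foldl (fun c d => c.insert d (c.getD d 0 + 1)) (PySem.Dict.empty : PySem.Dict (Int × Int × Int) Int)).getD a 0
        else ((avails.length : Int) - (viableBsearch avails a.2.1 avails.length 0 avails.length : Int)))) 0 from rfl]
  congr 1
  funext v a
  by_cases hu : a.2.1 = 0
  · simp only [hu, if_true]
    have : (fun (v : Int) (b : Int × Int × Int) => if a = b then v else v)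
        = (fun (v : Int) (_ : Int × Int × Int) => v) := by
      funext v b; split_ifs <;> rfl
    rw [this, PySem.List.foldl_ignore]
  · simp only [hu, if_false]
    have hfun : (fun (v : Int) (b : Int × Int × Int) =>
        if a = b then v else if a.2.1 ≤ b.2.2 then v + 1 else v)
        = (fun (v : Int) (b : Int × Int × Int) => if ¬a = b ∧ a.2.1 ≤ b.2.2 then v + 1 else v) := by
      funext v b
      by_cases h1 : a = b <;> by_cases h3 : a.2.1 ≤ b.2.2 <;> simp [h1, h3]
    rw [hfun, PySem.List.foldl_ite_add_one]
    congr 1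
    have c1 := countP_split disks a a.2.1
    have c2 := countP_eq_self disks a a.2.1
    have c3 := viableBsearch_countP avails a.2.1 hpw
    have c4 : avails.countP (fun x => decide (a.2.1 ≤ x))
        = disks.countP (fun b => decide (a.2.1 ≤ b.2.2)) := by
      rw [hperm.countP_eq, List.countP_map]; rfl
    rw [hcnt a]
    by_cases hle : a.2.1 ≤ a.2.2 <;> simp only [hle, if_true, if_false] at c2 ⊢ <;> omega
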